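-- pv_equiv track=rewrite | github.com/sureshmuruga/substring | substring.py | smallsub
-- ===== SOURCE A (Python) =====
-- def maxchar(st,n):
--     count=[0]*256
--     for i in range(n):
--         count[ord(st[i])]+=1
--     maxdist=0
--     for i in range(256):
--         if(count[i]!=0):
--             maxdist+=1
--
--     return maxdist
--
-- def smallsub(st):
--     n=len(st)
--     maxdist=maxchar(st,n)
--     minl=n
--     for i in range(n):
--         for j in range(n):
--             sub=st[i:j]
--             sub_dist=maxchar(st[i:j],len(sub))
--             if(len(sub) < minl and maxdist == sub_dist):
--                 minl=len(sub)
--     return minl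
-- ===== SOURCE B (Python) =====
-- def smallsub(st):
--     n = len(st)
--     k = len(set(st))
--     best = n
--     for i in range(n):
--         seen = set()
--         for j in range(i, n):
--             seen.add(st[j])
--             if len(seen) == k:
--                 if j + 1 - i < best:
--                     best = j + 1 - i
--                 break
--     return best
-- ===== Notes on version B (the rewrite author's own statement) =====
-- stated objective: faster
-- what changed: Replaces the O(n^3) double loop that recounts characters of every slice with a 256-slot array by a per-start incremental seen-set scan over the whole string that stops at the first (hence shortest) window containing all distinct characters.
-- intended difference: On strings where some window containing all distinct characters is strictly shorter than n and than every such window avoiding the last position (A's loops only build st[i:j] with j < n, so they never see windows needing the last character), A returns that too-large minimum (or n when no last-character-free window covers) while B returns the true minimal covering-window length, which is what the function is for; e.g. on 'aab' A returns 3 and B returns 2. — e.g. on smallsub("aab"): A returns 3, B returns 2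
import Mathlib
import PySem

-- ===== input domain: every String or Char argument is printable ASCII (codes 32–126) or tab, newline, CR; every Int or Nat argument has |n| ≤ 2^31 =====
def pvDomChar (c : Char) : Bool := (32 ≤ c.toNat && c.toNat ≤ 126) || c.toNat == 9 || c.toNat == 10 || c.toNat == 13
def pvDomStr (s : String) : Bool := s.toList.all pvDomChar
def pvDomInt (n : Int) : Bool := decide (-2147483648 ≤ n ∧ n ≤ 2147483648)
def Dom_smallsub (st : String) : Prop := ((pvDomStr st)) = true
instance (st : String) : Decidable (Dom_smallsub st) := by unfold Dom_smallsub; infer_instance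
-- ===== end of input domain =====

-- B replaces A's recount-every-slice double loop (a fresh 256-slot count per slice) by a
-- per-start incremental seen-set scan over the whole string that stops at the first (hence
-- shortest) covering window.
-- A's loops only ever form substrings st[i:j] with j < len(st), so A misses every covering
-- window that needs the last character; B considers those windows too (see D_smallsub below).

-- ===== PORT A =====
-- count[ord(c)] += 1  (Python raises IndexError for ord(c) ≥ 256; exact on Dom, where codes ≤ 126)
def arrStep (cnt : List Int) (c : Char) : List Int :=
  cnt.set c.toNat (PySem.List.pyGetD cnt (c.toNat : Int) 0 + 1)

def maxchar (st : List Char) (n : Int) : Int :=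
  let count : List Int := List.replicate 256 0
  let count := (PySem.List.pyRange 0 n 1).foldl
    (fun cnt i => arrStep cnt (PySem.List.pyGetD st i (Char.ofNat 0))) count
  (PySem.List.pyRange 0 256 1).foldl
    (fun md i => if PySem.List.pyGetD count i 0 ≠ 0 then md + 1 else md) 0

def smallsub (st : String) : Int :=
  let cs := st.toList
  let n : Int := (cs.length : Int)
  let maxdist := maxchar cs n
  (PySem.List.pyRange 0 n 1).foldl
    (fun minl i =>
      (PySem.List.pyRange 0 n 1).foldl
        (fun minl j =>
          let sub := PySem.List.slice cs (some i) (some j)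
          let sub_dist := maxchar sub ((sub.length : Int))
          if ((sub.length : Int) < minl ∧ maxdist = sub_dist) then (sub.length : Int) else minl)
        minl)
    n

-- ===== PORT B =====
-- the inner 'for j in range(i, n): … break' loop of Source B
def bScan (cs : List Char) (k : Int) (i : Int) (best : Int) : List Int → PySem.Set Char → Int
  | [], _ => best
  | j :: js, seen =>
      let seen := PySem.Set.add seen (PySem.List.pyGetD cs j (Char.ofNat 0))
      if ((seen.length : Int) = k) then
        (if j + 1 - i < best then j + 1 - i else best)
      else bScan cs k i best js seen

def smallsub_alt (st : String) : Int :=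
  let cs := st.toList
  let n : Int := (cs.length : Int)
  let k : Int := ((PySem.Set.ofList cs).length : Int)
  (PySem.List.pyRange 0 n 1).foldl
    (fun best i => bScan cs k i best (PySem.List.pyRange i n 1) PySem.Set.empty)
    n

-- ===== PRECONDITION & SPEC =====
-- number of distinct characters of a list (used by D_smallsub and by the proofs)
def dCount (cs : List Char) : Nat := (PySem.Set.ofList cs).length

-- A's loops only build substrings st[i:j] with j < len(st): on strings where some covering
-- window (one containing every distinct character) is strictly shorter than n and than every
-- covering window avoiding the last position, A returns that too-large minimum (or n when no
-- such window exists) while B returns the true minimal covering-window length, which is what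
-- the function is for.
def D_smallsub (st : String) : Prop :=
  ∃ l < st.toList.length,
    (∃ i < st.toList.length, dCount ((st.toList.drop i).take l) = dCount st.toList) ∧
    ∀ i < st.toList.length, dCount ((st.toList.dropLast.drop i).take l) ≠ dCount st.toList
instance (st : String) : Decidable (D_smallsub st) := by unfold D_smallsub; infer_instance

def Spec_smallsub (st : String) (out : Int) : Prop := ¬ D_smallsub st → out = smallsub_alt st
instance (st : String) (out : Int) : Decidable (Spec_smallsub st out) := by unfold Spec_smallsub; infer_instance

def pvDiffWitness_smallsub : String := "aab"
def pvDiffWitnessOut_smallsub : Int × Int := (3, 2)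

-- ===== CLAIM (what is proved, stated in full; the proofs are below) =====
def Claim_unchanged_smallsub : Prop := ∀ (st : String), Dom_smallsub st → Spec_smallsub st (smallsub st)
def Claim_changed_smallsub : Prop := Dom_smallsub (pvDiffWitness_smallsub) ∧ D_smallsub (pvDiffWitness_smallsub) ∧ smallsub (pvDiffWitness_smallsub) = pvDiffWitnessOut_smallsub.1 ∧ smallsub_alt (pvDiffWitness_smallsub) = pvDiffWitnessOut_smallsub.2 ∧ pvDiffWitnessOut_smallsub.1 ≠ pvDiffWitnessOut_smallsub.2
def Claim_exact_smallsub : Prop := ∀ (st : String), Dom_smallsub st → D_smallsub st → smallsub st ≠ smallsub_alt st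

-- ===== LEMMAS AND PROOFS =====

-- the window of lst from index i (inclusive) to endpoint e (exclusive)
def winTake (lst : List Char) (i e : Nat) : List Char := (lst.drop i).take (e - i)

-- endpoints e in (j, lst.length] whose window from i covers all k distinct characters
def hitsFrom (lst : List Char) (k : Int) (i j : Nat) : List Nat :=
  (List.range' (j+1) (lst.length - j)).filter
    (fun e => decide ((dCount (winTake lst i e) : Int) = k))

-- the common shape of one outer-loop step of both programs
def gStep (lst : List Char) (k : Int) (m : Int) (i : Int) : Int :=
  match (hitsFrom lst k i.toNat i.toNat).head? with
  | none => m
  | some e => min m ((e : Int) - i)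

-- lengths (as Ints) of all covering windows of lst, and the capped minimum both loops compute
def hitLens (lst : List Char) (k : Int) : List Int :=
  (List.range lst.length).flatMap
    (fun i => (hitsFrom lst k i i).map (fun e : Nat => (e : Int) - (i : Int)))

def mwin (lst : List Char) (k m : Int) : Int := (hitLens lst k).foldl min m

theorem dom_char_lt {st : String} (h : Dom_smallsub st) : ∀ c ∈ st.toList, c.toNat < 256 := by
  intro c hc
  have := (List.all_eq_true.mp h) c hc
  simp only [pvDomChar, Bool.or_eq_true, Bool.and_eq_true, decide_eq_true_eq, beq_iff_eq] at this
  omega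

theorem char_toNat_inj {c d : Char} (h : c.toNat = d.toNat) : c = d := by
  apply Char.ext; exact UInt32.toNat_inj.mp h

theorem getD_set (l : List Int) (a : Nat) (v : Int) (h : a < l.length) (k : Nat) :
    (l.set a v).getD k 0 = if a = k then v else l.getD k 0 := by
  by_cases hk : a = k
  · subst hk; simp [List.getD, List.getElem?_set_self h]
  · simp [List.getD, hk]

theorem countArr_spec : ∀ (cs : List Char) (cnt : List Int), cnt.length = 256 →
    (∀ c ∈ cs, c.toNat < 256) →
    (cs.foldl arrStep cnt).length = 256 ∧
    ∀ kk : Nat, (cs.foldl arrStep cnt).getD kk 0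
      = cnt.getD kk 0 + (cs.countP (fun c => c.toNat = kk) : Int) := by
  intro cs
  induction cs with
  | nil => intro cnt hlen _; simpa using hlen
  | cons c cs ih =>
    intro cnt hlen hcode
    have hc : c.toNat < cnt.length := by rw [hlen]; exact hcode c (by simp)
    have hstep : (arrStep cnt c).length = 256 := by simp [arrStep, hlen]
    obtain ⟨h1, h2⟩ := ih (arrStep cnt c) hstep (fun d hd => hcode d (by simp [hd]))
    refine ⟨h1, fun kk => ?_⟩
    rw [List.foldl_cons] at *
    rw [h2 kk]
    have : (arrStep cnt c).getD kk 0
        = if c.toNat = kk then cnt.getD c.toNat 0 + 1 else cnt.getD kk 0 := by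
      simp only [arrStep, PySem.List.pyGetD_natCast]
      exact getD_set cnt c.toNat _ hc kk
    rw [this, List.countP_cons]
    by_cases hck : c.toNat = kk
    · simp [hck]; ring
    · simp [hck]

theorem countP_set_aux (l : List Int) (a : Nat) (v : Int) (h : a < l.length) (p : Int → Bool) :
    (l.set a v).countP p + (if p l[a] then 1 else 0) = l.countP p + (if p v then 1 else 0) := by
  rw [List.set_eq_take_append_cons_drop, if_pos h]
  conv_rhs => rw [← List.take_append_drop a l, ← List.getElem_cons_drop (as := l) (i := a) h]
  simp only [List.countP_append, List.countP_cons]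
  by_cases hp : p v <;> by_cases hq : p l[a] <;> simp [hp, hq] <;> omega

theorem ofList_append_singleton {α : Type} [BEq α] [LawfulBEq α] (xs : List α) (c : α) :
    PySem.Set.ofList (xs ++ [c])
      = if c ∈ xs then PySem.Set.ofList xs else PySem.Set.ofList xs ++ [c] := by
  rw [PySem.Set.ofList_eq_foldl, List.foldl_append]
  rw [← PySem.Set.ofList_eq_foldl]
  simp only [List.foldl_cons, List.foldl_nil, PySem.Set.add, PySem.Set.contains]
  by_cases hm : c ∈ xs
  · simp [hm]
  · simp [hm, (PySem.Set.mem_ofList xs c)]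

theorem mem_iff_countP_toNat {ds : List Char} {c : Char} :
    c ∈ ds ↔ 0 < ds.countP (fun d => d.toNat = c.toNat) := by
  rw [List.countP_pos_iff]
  constructor
  · intro h; exact ⟨c, h, by simp⟩
  · rintro ⟨d, hd, hdc⟩
    simp only [decide_eq_true_eq] at hdc
    rwa [← char_toNat_inj hdc]

theorem getD_replicate_zero (kk : Nat) : (List.replicate 256 (0 : Int)).getD kk 0 = 0 := by
  simp only [List.getD, List.getElem?_replicate]
  split <;> simp

theorem countP_replicate_zero :
    (List.replicate 256 (0 : Int)).countP (fun v => decide (v ≠ 0)) = 0 := by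
  apply List.countP_eq_zero.mpr
  intro v hv
  rw [List.eq_of_mem_replicate hv]
  simp

theorem countP_arr_eq_dCount : ∀ (cs : List Char), (∀ c ∈ cs, c.toNat < 256) →
    ((cs.foldl arrStep (List.replicate 256 0)).countP (fun v => decide (v ≠ 0))) = dCount cs := by
  intro cs
  induction cs using List.reverseRecOn with
  | nil =>
    intro _
    rw [List.foldl_nil, countP_replicate_zero]
    rfl
  | append_singleton ds c ih =>
    intro hcode
    have hds : ∀ d ∈ ds, d.toNat < 256 := fun d hd => hcode d (by simp [hd])
    have hc : c.toNat < 256 := hcode c (by simp)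
    obtain ⟨hlen, hget⟩ := countArr_spec ds (List.replicate 256 0)
      (List.length_replicate) hds
    set arr := ds.foldl arrStep (List.replicate 256 0) with harr
    have ha : c.toNat < arr.length := by rw [hlen]; exact hc
    have hgetc : arr.getD c.toNat 0 = (ds.countP (fun d => d.toNat = c.toNat) : Int) := by
      rw [hget c.toNat, getD_replicate_zero, zero_add]
    have hfold : (ds ++ [c]).foldl arrStep (List.replicate 256 0)
        = arr.set c.toNat (arr.getD c.toNat 0 + 1) := by
      rw [List.foldl_append, ← harr]
      simp [arrStep, PySem.List.pyGetD_natCast]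
    have helem : arr[c.toNat] = arr.getD c.toNat 0 := (List.getD_eq_getElem arr 0 ha).symm
    have haux := countP_set_aux arr c.toNat (arr.getD c.toNat 0 + 1) ha (fun v => decide (v ≠ 0))
    rw [helem] at haux
    have hd2 : dCount (ds ++ [c]) = dCount ds + (if c ∈ ds then 0 else 1) := by
      unfold dCount
      rw [ofList_append_singleton]
      by_cases hm : c ∈ ds <;> simp [hm]
    rw [hfold, hd2, ← ih hds]
    rw [hgetc] at haux ⊢
    by_cases hm : c ∈ ds
    · have hpos : 0 < ds.countP (fun d => d.toNat = c.toNat) := mem_iff_countP_toNat.mp hm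
      have c1 : ((ds.countP (fun d => d.toNat = c.toNat) : Int) ≠ 0) := by
        exact_mod_cast hpos.ne'
      have c2 : ((ds.countP (fun d => d.toNat = c.toNat) : Int) + 1 ≠ 0) := by
        have h0 : (0:Int) ≤ (ds.countP (fun d => d.toNat = c.toNat) : Int) := by positivity
        omega
      rw [decide_eq_true c1, decide_eq_true c2] at haux
      simp at haux
      simp [hm]
      omega
    · have hzero : ds.countP (fun d => d.toNat = c.toNat) = 0 := by
        by_contra hne
        exact hm (mem_iff_countP_toNat.mpr (Nat.pos_of_ne_zero hne))
      rw [hzero] at haux ⊢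
      norm_num at haux
      simp [hm]
      omega

theorem maxchar_eq (cs : List Char) (h : ∀ c ∈ cs, c.toNat < 256) :
    maxchar cs ((cs.length : Int)) = (dCount cs : Int) := by
  unfold maxchar
  simp only []
  rw [PySem.List.foldl_pyRange_pyGetD' cs (Char.ofNat 0)
    (fun cnt c => arrStep cnt c) (List.replicate 256 0) (le_refl 0)]
  rw [Int.toNat_zero, List.drop_zero]
  obtain ⟨hlen, -⟩ := countArr_spec cs (List.replicate 256 0) List.length_replicate h
  conv_lhs => rw [show (256 : Int) = ((cs.foldl arrStep (List.replicate 256 0)).length : Int) by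
    rw [hlen]; norm_num]
  rw [PySem.List.foldl_pyRange_pyGetD' (cs.foldl arrStep (List.replicate 256 0)) 0
    (fun md v => if v ≠ 0 then md + 1 else md) 0 (le_refl 0)]
  rw [Int.toNat_zero, List.drop_zero]
  rw [PySem.List.foldl_ite_add_one (fun v => v ≠ 0)]
  rw [countP_arr_eq_dCount cs h]
  ring

theorem dCount_pos {cs : List Char} (h : cs ≠ []) : 0 < dCount cs := by
  obtain ⟨c, cs', rfl⟩ := List.exists_cons_of_ne_nil h
  have : c ∈ PySem.Set.ofList (c :: cs') := (PySem.Set.mem_ofList _ c).mpr (by simp)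
  exact List.length_pos_of_mem this

theorem foldl_min_all_ge (t : List Int) (v : Int) (hv : ∀ y ∈ t, v ≤ y) :
    ∀ m : Int, t.foldl min (min m v) = min m v := by
  induction t with
  | nil => intro m; rfl
  | cons y t ih =>
    intro m
    have h1 : v ≤ y := hv y (by simp)
    have h2 : min (min m v) y = min m v := by omega
    rw [List.foldl_cons, h2]
    exact ih (fun z hz => hv z (by simp [hz])) m

theorem foldl_min_sorted (l : List Int) (h : l.Pairwise (· ≤ ·)) (m : Int) :
    l.foldl min m = match l.head? with | none => m | some v => min m v := by
  cases l with
  | nil => rfl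
  | cons v t =>
    simp only [List.head?_cons, List.foldl_cons]
    exact foldl_min_all_ge t v (List.pairwise_cons.mp h).1 m

theorem winTake_succ (lst : List Char) (iN jN : Nat) (hij : iN ≤ jN) (hj : jN < lst.length) :
    winTake lst iN (jN+1) = winTake lst iN jN ++ [lst[jN]] := by
  unfold winTake
  have h1 : jN + 1 - iN = (jN - iN) + 1 := by omega
  rw [h1, List.take_add_one]
  congr 1
  have h2 : (lst.drop iN)[jN - iN]? = some lst[jN] := by
    rw [List.getElem?_drop]
    have : iN + (jN - iN) = jN := by omega
    rw [this, List.getElem?_eq_getElem hj]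
  simp [h2]

theorem ofList_concat {α : Type} [BEq α] (xs : List α) (c : α) :
    PySem.Set.ofList (xs ++ [c]) = PySem.Set.add (PySem.Set.ofList xs) c := by
  rw [PySem.Set.ofList_eq_foldl, List.foldl_append, ← PySem.Set.ofList_eq_foldl]
  rfl

theorem bScan_eq (lst : List Char) (k : Int) (iN : Nat) (best : Int) :
    ∀ (jN : Nat), iN ≤ jN → jN ≤ lst.length →
    bScan lst k (iN : Int) best
      (PySem.List.pyRange (jN : Int) ((lst.length : Int)) 1)
      (PySem.Set.ofList (winTake lst iN jN))
    = match (hitsFrom lst k iN jN).head? with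
      | none => best
      | some e => min best ((e : Int) - (iN : Int)) := by
  suffices H : ∀ fuel jN, lst.length - jN ≤ fuel → iN ≤ jN → jN ≤ lst.length →
      bScan lst k (iN : Int) best
        (PySem.List.pyRange (jN : Int) ((lst.length : Int)) 1)
        (PySem.Set.ofList (winTake lst iN jN))
      = match (hitsFrom lst k iN jN).head? with
        | none => best
        | some e => min best ((e : Int) - (iN : Int)) by
    intro jN h1 h2
    exact H (lst.length - jN) jN le_rfl h1 h2
  intro fuel
  induction fuel with
  | zero =>
    intro jN hfuel hij hjb
    have hj : jN = lst.length := by omega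
    subst hj
    rw [PySem.List.pyRange_one_eq_nil (le_refl _)]
    have : hitsFrom lst k iN lst.length = [] := by
      unfold hitsFrom
      rw [Nat.sub_self]
      rfl
    rw [this]
    rfl
  | succ fuel ih =>
    intro jN hfuel hij hjb
    by_cases hj : jN = lst.length
    · subst hj
      rw [PySem.List.pyRange_one_eq_nil (le_refl _)]
      have : hitsFrom lst k iN lst.length = [] := by
        unfold hitsFrom
        rw [Nat.sub_self]
        rfl
      rw [this]
      rfl
    · have hjlt : jN < lst.length := by omega
      rw [PySem.List.pyRange_one_cons (by exact_mod_cast hjlt)]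
      simp only [bScan]
      have hget : PySem.List.pyGetD lst (jN : Int) (Char.ofNat 0) = lst[jN] := by
        rw [PySem.List.pyGetD_natCast]
        exact List.getD_eq_getElem lst (Char.ofNat 0) hjlt
      rw [hget]
      have hseen : PySem.Set.add (PySem.Set.ofList (winTake lst iN jN)) lst[jN]
          = PySem.Set.ofList (winTake lst iN (jN+1)) := by
        rw [winTake_succ lst iN jN hij hjlt, ofList_concat]
      rw [hseen]
      have hsplit : lst.length - jN = (lst.length - (jN+1)) + 1 := by omega
      have hhits : hitsFrom lst k iN jN
          = (List.range' (jN+1) ((lst.length - (jN+1)) + 1)).filter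
              (fun e => decide ((dCount (winTake lst iN e) : Int) = k)) := by
        unfold hitsFrom
        rw [hsplit]
      rw [hhits, List.range'_succ]
      by_cases hcond : ((dCount (winTake lst iN (jN+1)) : Int) = k)
      · have hb : (((PySem.Set.ofList (winTake lst iN (jN+1))).length : Int) = k) := hcond
        rw [if_pos hb]
        rw [List.filter_cons_of_pos (by simpa using hcond)]
        simp only [List.head?_cons]
        push_cast
        split_ifs with hlt
        · rw [min_eq_right (le_of_lt hlt)]
        · rw [min_eq_left (by omega)]
      · have hb : ¬(((PySem.Set.ofList (winTake lst iN (jN+1))).length : Int) = k) := hcond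
        rw [if_neg hb]
        rw [List.filter_cons_of_neg (by simpa using hcond)]
        have hcast : ((jN : Int) + 1) = ((jN + 1 : Nat) : Int) := by push_cast; ring
        rw [hcast]
        exact ih (jN+1) (by omega) (by omega) (by omega)

theorem winTake_dropLast (cs : List Char) (iN e : Nat) (he : e ≤ cs.length - 1) :
    winTake cs.dropLast iN e = (cs.drop iN).take (e - iN) := by
  unfold winTake
  rw [List.dropLast_eq_take, List.drop_take, List.take_take]
  congr 1
  omega

theorem innerA_eq (st : String) (hdom : Dom_smallsub st) (iN : Nat)
    (hi : iN < st.toList.length) (hne : st.toList ≠ []) :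
    ∀ m : Int,
    (PySem.List.pyRange 0 ((st.toList.length : Int)) 1).foldl
      (fun minl j =>
        let sub := PySem.List.slice st.toList (some (iN : Int)) (some j)
        let sub_dist := maxchar sub ((sub.length : Int))
        if ((sub.length : Int) < minl ∧ maxchar st.toList ((st.toList.length : Int)) = sub_dist)
        then (sub.length : Int) else minl) m
    = gStep st.toList.dropLast ((dCount st.toList : Int)) m (iN : Int) := by
  intro m
  have hcode : ∀ c ∈ st.toList, c.toNat < 256 := dom_char_lt hdom
  have hkpos : 0 < dCount st.toList := dCount_pos hne
  have hmax : maxchar st.toList ((st.toList.length : Int)) = (dCount st.toList : Int) :=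
    maxchar_eq st.toList hcode
  have hstep1 : ∀ (acc : Int), ∀ j ∈ PySem.List.pyRange 0 ((st.toList.length : Int)) 1,
      (let sub := PySem.List.slice st.toList (some (iN : Int)) (some j)
       let sub_dist := maxchar sub ((sub.length : Int))
       if ((sub.length : Int) < acc ∧ maxchar st.toList ((st.toList.length : Int)) = sub_dist)
       then (sub.length : Int) else acc)
      = (if ((dCount st.toList : Int)
            = (dCount (PySem.List.slice st.toList (some (iN : Int)) (some j)) : Int))
         then min acc ((PySem.List.slice st.toList (some (iN : Int)) (some j)).length : Int)
         else acc) := by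
    intro acc j _
    simp only []
    rw [hmax, maxchar_eq _ (fun c hc => hcode c (PySem.List.mem_of_mem_slice _ _ _ hc))]
    by_cases hD : ((dCount st.toList : Int)
        = (dCount (PySem.List.slice st.toList (some (iN : Int)) (some j)) : Int))
    · simp only [hD, and_true, if_true]
      split_ifs with h
      · exact (min_eq_right h.le).symm
      · exact (min_eq_left (not_lt.mp h)).symm
    · simp [hD]
  rw [PySem.List.foldl_congr_mem _ _
    (fun minl j => if ((dCount st.toList : Int)
        = (dCount (PySem.List.slice st.toList (some (iN : Int)) (some j)) : Int))
      then min minl ((PySem.List.slice st.toList (some (iN : Int)) (some j)).length : Int)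
      else minl) m hstep1]
  rw [PySem.List.foldl_ite_eq_foldl_filter
    (fun j => ((dCount st.toList : Int)
      = (dCount (PySem.List.slice st.toList (some (iN : Int)) (some j)) : Int)))
    (fun minl j => min minl ((PySem.List.slice st.toList (some (iN : Int)) (some j)).length : Int))]
  rw [PySem.List.pyRange_zero_natCast, List.filter_map, List.foldl_map]
  have hfil : ((List.range st.toList.length).filter
        ((fun j => decide ((dCount st.toList : Int)
          = (dCount (PySem.List.slice st.toList (some (iN : Int)) (some j)) : Int)))
          ∘ (fun (e : Nat) => (e : Int))))
      = hitsFrom st.toList.dropLast ((dCount st.toList : Int)) iN iN := by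
    have hn : st.toList.length = (iN + 1) + (st.toList.length - 1 - iN) := by omega
    rw [List.range_eq_range']
    conv_lhs => rw [hn]
    rw [← List.range'_append_1, List.filter_append]
    have h1 : (List.range' 0 (iN+1)).filter
        ((fun j => decide ((dCount st.toList : Int)
          = (dCount (PySem.List.slice st.toList (some (iN : Int)) (some j)) : Int)))
          ∘ (fun (e : Nat) => (e : Int))) = [] := by
      apply List.filter_eq_nil_iff.mpr
      intro e he
      have he' : e < iN + 1 := by
        have := List.mem_range'_1.mp he; omega
      simp only [Function.comp_apply, decide_eq_true_eq]
      rw [PySem.List.slice_natCast]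
      have : e - iN = 0 := by omega
      rw [this, List.take_zero]
      intro hcon
      have : dCount st.toList = dCount ([] : List Char) := by exact_mod_cast hcon
      rw [this] at hkpos
      simp [dCount, PySem.Set.ofList] at hkpos
    rw [h1, List.nil_append]
    unfold hitsFrom
    rw [List.length_dropLast]
    rw [Nat.zero_add]
    apply List.filter_congr
    intro e he
    obtain ⟨he1, he2⟩ := List.mem_range'_1.mp he
    have hee : e ≤ st.toList.length - 1 := by omega
    simp only [Function.comp_apply]
    rw [PySem.List.slice_natCast, winTake_dropLast st.toList iN e hee]
    exact decide_eq_decide.mpr (by constructor <;> (intro h; omega))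
  rw [hfil]
  have hstep5 : ∀ (acc : Int), ∀ e ∈ hitsFrom st.toList.dropLast ((dCount st.toList : Int)) iN iN,
      min acc ((PySem.List.slice st.toList (some (iN : Int)) (some (e : Int))).length : Int)
      = min acc ((e : Int) - (iN : Int)) := by
    intro acc e he
    have he' : e ∈ List.range' (iN+1) (st.toList.dropLast.length - iN) :=
      List.mem_of_mem_filter he
    obtain ⟨he1, he2⟩ := List.mem_range'_1.mp he'
    have hlen : (PySem.List.slice st.toList (some (iN : Int)) (some (e : Int))).length
        = e - iN := by
      rw [PySem.List.slice_natCast, List.length_take, List.length_drop]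
      have hdl : st.toList.dropLast.length = st.toList.length - 1 := List.length_dropLast
      omega
    rw [hlen]
    congr 1
    push_cast [Nat.cast_sub (by omega : iN ≤ e)]
    ring
  rw [PySem.List.foldl_congr_mem _ _
    (fun minl (e : Nat) => min minl ((e : Int) - (iN : Int))) m hstep5]
  rw [← List.foldl_map (f := fun (e : Nat) => (e : Int) - (iN : Int)) (g := min)]
  have hpair : (List.map (fun (e : Nat) => (e : Int) - (iN : Int))
      (hitsFrom st.toList.dropLast ((dCount st.toList : Int)) iN iN)).Pairwise (· ≤ ·) := by
    apply List.Pairwise.map (R := fun (a b : Nat) => a < b) _ ?_ ?_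
    · intro a b hab
      have hc : (a : Int) ≤ (b : Int) := by exact_mod_cast hab.le
      omega
    · exact List.Pairwise.filter _ (List.pairwise_lt_range' 1)
  rw [foldl_min_sorted _ hpair m]
  rw [List.head?_map]
  unfold gStep
  rw [Int.toNat_natCast]
  cases (hitsFrom st.toList.dropLast ((dCount st.toList : Int)) iN iN).head? <;> rfl

-- gStep at a Nat index is a min-fold over the lengths of that start's covering windows
theorem gStep_eq_foldl (lst : List Char) (k m : Int) (iN : Nat) :
    gStep lst k m (iN : Int)
      = ((hitsFrom lst k iN iN).map (fun e : Nat => (e : Int) - (iN : Int))).foldl min m := by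
  have hpair : ((hitsFrom lst k iN iN).map (fun e : Nat => (e : Int) - (iN : Int))).Pairwise (· ≤ ·) := by
    apply List.Pairwise.map (R := fun (a b : Nat) => a < b) _ ?_ ?_
    · intro a b hab
      have hc : (a : Int) ≤ (b : Int) := by exact_mod_cast hab.le
      omega
    · exact List.Pairwise.filter _ (List.pairwise_lt_range' 1)
  rw [foldl_min_sorted _ hpair m, List.head?_map]
  unfold gStep
  rw [Int.toNat_natCast]
  cases (hitsFrom lst k iN iN).head? <;> rfl

theorem foldl_foldl_min {α : Type} (f : α → List Int) (l : List α) (m : Int) :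
    l.foldl (fun acc x => (f x).foldl min acc) m = (l.flatMap f).foldl min m := by
  induction l generalizing m with
  | nil => rfl
  | cons x l ih => simp only [List.foldl_cons, List.flatMap_cons, List.foldl_append, ih]

theorem foldl_gStep (lst : List Char) (k m : Int) :
    (List.range lst.length).foldl (fun acc (iN : Nat) => gStep lst k acc (iN : Int)) m
      = mwin lst k m := by
  unfold mwin hitLens
  rw [← foldl_foldl_min]
  exact PySem.List.foldl_congr_mem _ _ _ m
    (fun acc iN _ => gStep_eq_foldl lst k acc iN)

-- characterization of A's result
theorem A_char (st : String) (hdom : Dom_smallsub st) :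
    smallsub st
      = mwin st.toList.dropLast ((dCount st.toList : Int)) ((st.toList.length : Int)) := by
  by_cases hnil : st.toList.length = 0
  · have hcs : st.toList = [] := List.eq_nil_of_length_eq_zero hnil
    unfold smallsub mwin hitLens
    rw [hcs]
    simp [PySem.List.pyRange_one_eq_nil]
  · have hne : st.toList ≠ [] := fun h => hnil (by rw [h]; rfl)
    have hn1 : 1 ≤ st.toList.length := by omega
    unfold smallsub
    simp only []
    have houtA : ∀ (acc : Int), ∀ i ∈ PySem.List.pyRange 0 ((st.toList.length : Int)) 1,
        (PySem.List.pyRange 0 ((st.toList.length : Int)) 1).foldl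
          (fun minl j =>
            let sub := PySem.List.slice st.toList (some i) (some j)
            let sub_dist := maxchar sub ((sub.length : Int))
            if ((sub.length : Int) < minl ∧ maxchar st.toList ((st.toList.length : Int)) = sub_dist)
            then (sub.length : Int) else minl) acc
        = gStep st.toList.dropLast ((dCount st.toList : Int)) acc i := by
      intro acc i hi
      obtain ⟨h0, h1⟩ := PySem.List.mem_pyRange_one.mp hi
      have hcast : i = ((i.toNat : Nat) : Int) := (Int.toNat_of_nonneg h0).symm
      rw [hcast]
      exact innerA_eq st hdom i.toNat (by omega) hne acc
    rw [PySem.List.foldl_congr_mem _ _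
      (gStep st.toList.dropLast ((dCount st.toList : Int))) _ houtA]
    rw [PySem.List.pyRange_one_append 0 ((st.toList.length : Int) - 1) ((st.toList.length : Int))
      (by omega) (by omega), List.foldl_append]
    have hsing : PySem.List.pyRange ((st.toList.length : Int) - 1) ((st.toList.length : Int)) 1
        = [(st.toList.length : Int) - 1] := by
      rw [show PySem.List.pyRange ((st.toList.length : Int) - 1) ((st.toList.length : Int)) 1
          = PySem.List.pyRange ((st.toList.length : Int) - 1)
              (((st.toList.length : Int) - 1) + 1) 1 by norm_num]
      exact PySem.List.pyRange_one_singleton _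
    have hlast : ∀ acc : Int,
        gStep st.toList.dropLast ((dCount st.toList : Int)) acc ((st.toList.length : Int) - 1)
          = acc := by
      intro acc
      unfold gStep
      have h1 : ((st.toList.length : Int) - 1).toNat = st.toList.length - 1 := by omega
      rw [h1]
      have h2 : hitsFrom st.toList.dropLast ((dCount st.toList : Int))
          (st.toList.length - 1) (st.toList.length - 1) = [] := by
        unfold hitsFrom
        rw [List.length_dropLast, Nat.sub_self]
        rfl
      rw [h2]
      rfl
    rw [hsing]
    rw [List.foldl_cons, List.foldl_nil, hlast]
    have hblen : ((st.toList.length : Int) - 1) = ((st.toList.dropLast.length : Int)) := by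
      rw [List.length_dropLast]; omega
    rw [hblen, PySem.List.pyRange_zero_natCast, List.foldl_map]
    exact foldl_gStep _ _ _

-- characterization of B's result
theorem B_char (st : String) :
    smallsub_alt st = mwin st.toList ((dCount st.toList : Int)) ((st.toList.length : Int)) := by
  unfold smallsub_alt
  simp only []
  have houtB : ∀ (acc : Int), ∀ i ∈ PySem.List.pyRange 0 ((st.toList.length : Int)) 1,
      bScan st.toList ((PySem.Set.ofList st.toList).length : Int) i acc
        (PySem.List.pyRange i ((st.toList.length : Int)) 1) PySem.Set.empty
      = gStep st.toList ((dCount st.toList : Int)) acc i := by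
    intro acc i hi
    obtain ⟨h0, h1⟩ := PySem.List.mem_pyRange_one.mp hi
    have hcast : i = ((i.toNat : Nat) : Int) := (Int.toNat_of_nonneg h0).symm
    rw [hcast]
    have hempty : (PySem.Set.empty : PySem.Set Char)
        = PySem.Set.ofList (winTake st.toList i.toNat i.toNat) := by
      unfold winTake
      rw [Nat.sub_self, List.take_zero]
      rfl
    rw [hempty]
    have hb := bScan_eq st.toList ((dCount st.toList : Int)) i.toNat acc i.toNat
      le_rfl (by omega)
    unfold gStep
    rw [Int.toNat_natCast]
    exact hb
  rw [PySem.List.foldl_congr_mem _ _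
    (gStep st.toList ((dCount st.toList : Int))) _ houtB]
  rw [PySem.List.pyRange_zero_natCast, List.foldl_map]
  exact foldl_gStep _ _ _

theorem mem_hitLens {lst : List Char} {k x : Int} :
    x ∈ hitLens lst k ↔ ∃ iN eN : Nat, iN < eN ∧ eN ≤ lst.length ∧
      ((dCount ((lst.drop iN).take (eN - iN)) : Int) = k) ∧ x = (eN : Int) - (iN : Int) := by
  unfold hitLens hitsFrom
  simp only [List.mem_flatMap, List.mem_range, List.mem_map, List.mem_filter,
    List.mem_range'_1, decide_eq_true_eq, winTake]
  constructor
  · rintro ⟨i, hi, e, ⟨⟨he1, he2⟩, hcov⟩, rfl⟩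
    exact ⟨i, e, by omega, by omega, hcov, rfl⟩
  · rintro ⟨i, e, h1, h2, hcov, rfl⟩
    exact ⟨i, by omega, e, ⟨⟨by omega, by omega⟩, hcov⟩, rfl⟩

theorem foldl_min_le_init (L : List Int) (m : Int) : L.foldl min m ≤ m := by
  induction L generalizing m with
  | nil => exact le_refl m
  | cons x L ih =>
    rw [List.foldl_cons]
    exact le_trans (ih (min m x)) (min_le_left m x)

theorem foldl_min_le_mem {L : List Int} {x : Int} (h : x ∈ L) (m : Int) : L.foldl min m ≤ x := by
  induction L generalizing m with
  | nil => cases h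
  | cons y L ih =>
    rw [List.foldl_cons]
    rcases List.mem_cons.mp h with rfl | h'
    · exact le_trans (foldl_min_le_init L (min m x)) (min_le_right m x)
    · exact ih h' (min m y)

theorem foldl_min_cases (L : List Int) (m : Int) : L.foldl min m = m ∨ L.foldl min m ∈ L := by
  induction L generalizing m with
  | nil => exact Or.inl rfl
  | cons x L ih =>
    rw [List.foldl_cons]
    rcases ih (min m x) with h | h
    · rcases min_cases m x with ⟨h2, -⟩ | ⟨h2, -⟩
      · exact Or.inl (h.trans h2)
      · exact Or.inr (by rw [h, h2]; exact List.mem_cons_self)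
    · exact Or.inr (List.mem_cons_of_mem x h)

-- a covering window of the last-character-free part is a covering window of the whole string
theorem hit_body_to_cs {cs : List Char} {k x : Int} (h : x ∈ hitLens cs.dropLast k) :
    x ∈ hitLens cs k := by
  rcases mem_hitLens.mp h with ⟨i, e, h1, h2, hcov, rfl⟩
  rw [List.length_dropLast] at h2
  have hwin : (cs.dropLast.drop i).take (e - i) = (cs.drop i).take (e - i) :=
    winTake_dropLast cs i e h2
  rw [hwin] at hcov
  exact mem_hitLens.mpr ⟨i, e, h1, by omega, hcov, rfl⟩

-- B's capped minimum never exceeds A's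
theorem mwin_cs_le_body (cs : List Char) :
    mwin cs ((dCount cs : Int)) ((cs.length : Int))
      ≤ mwin cs.dropLast ((dCount cs : Int)) ((cs.length : Int)) := by
  unfold mwin
  rcases foldl_min_cases (hitLens cs.dropLast ((dCount cs : Int))) ((cs.length : Int)) with h | h
  · rw [h]
    exact foldl_min_le_init _ _
  · exact foldl_min_le_mem (hit_body_to_cs h) _

theorem dCount_nil : dCount ([] : List Char) = 0 := rfl

-- distinct-count as a Finset cardinality, and its monotonicity on nested windows
theorem dCount_eq_card (w : List Char) : dCount w = w.toFinset.card := by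
  have hnd : (PySem.Set.ofList w).Nodup := PySem.Set.nodup_ofList w
  have hfs : (PySem.Set.ofList w).toFinset = w.toFinset := by
    ext c
    simp [List.mem_toFinset, PySem.Set.mem_ofList]
  rw [dCount, ← List.toFinset_card_of_nodup hnd, hfs]

theorem dCount_mono_eq {w1 w2 cs : List Char} (h12 : w1 ⊆ w2) (h2c : w2 ⊆ cs)
    (h : dCount w1 = dCount cs) : dCount w2 = dCount cs := by
  simp only [dCount_eq_card] at h ⊢
  have a1 : w1.toFinset ⊆ w2.toFinset := by
    intro x hx
    simp only [List.mem_toFinset] at *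
    exact h12 hx
  have a2 : w2.toFinset ⊆ cs.toFinset := by
    intro x hx
    simp only [List.mem_toFinset] at *
    exact h2c hx
  have := Finset.card_le_card a1
  have := Finset.card_le_card a2
  omega

theorem window_subset (cs : List Char) (i a : Nat) : (cs.drop i).take a ⊆ cs := by
  intro x hx
  exact List.mem_of_mem_drop (List.mem_of_mem_take hx)

theorem take_subset_take_le (X : List Char) {a b : Nat} (h : a ≤ b) : X.take a ⊆ X.take b := by
  intro x hx
  have heq : X.take a = (X.take b).take a := by
    rw [List.take_take, min_eq_left h]
  rw [heq] at hx
  exact List.mem_of_mem_take hx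

-- the nominal-length-l window from i, truncated at the end of the list
theorem take_min_eq (X : List Char) (i l : Nat) :
    (X.drop i).take l = (X.drop i).take (min (i + l) X.length - i) := by
  by_cases hle : i + l ≤ X.length
  · have : min (i + l) X.length - i = l := by omega
    rw [this]
  · have hgt : X.length < i + l := by omega
    have hlen : (X.drop i).length = X.length - i := List.length_drop
    have h1 : (X.drop i).take l = X.drop i := List.take_of_length_le (by omega)
    have h2 : (X.drop i).take (min (i + l) X.length - i) = X.drop i :=
      List.take_of_length_le (by omega)
    rw [h1, h2]

-- outside D_, A's capped minimum never exceeds B's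
theorem mwin_body_le_cs (st : String) (hnD : ¬ D_smallsub st) :
    mwin st.toList.dropLast ((dCount st.toList : Int)) ((st.toList.length : Int))
      ≤ mwin st.toList ((dCount st.toList : Int)) ((st.toList.length : Int)) := by
  unfold mwin
  rw [D_smallsub] at hnD
  push_neg at hnD
  rcases foldl_min_cases (hitLens st.toList ((dCount st.toList : Int)))
      ((st.toList.length : Int)) with h | h
  · rw [h]
    exact foldl_min_le_init _ _
  · rcases mem_hitLens.mp h with ⟨i, e, h1, h2, hcov, hx⟩
    have hcovN : dCount ((st.toList.drop i).take (e - i)) = dCount st.toList := by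
      exact_mod_cast hcov
    have hne : st.toList ≠ [] := by
      intro hc
      rw [hc] at h2
      simp at h2
      omega
    by_cases hlt : e - i < st.toList.length
    · obtain ⟨i2, hi2, hcov2⟩ := hnD (e - i) hlt ⟨i, by omega, hcovN⟩
      have hi2b : i2 < st.toList.dropLast.length := by
        by_contra hge
        have hdrop : st.toList.dropLast.drop i2 = [] := List.drop_eq_nil_of_le (by omega)
        rw [hdrop, List.take_nil, dCount_nil] at hcov2
        have := dCount_pos hne
        omega
      have hwinEq : (st.toList.dropLast.drop i2).take (e - i)
          = (st.toList.dropLast.drop i2).take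
              (min (i2 + (e - i)) st.toList.dropLast.length - i2) :=
        take_min_eq _ _ _
      have hi2e2 : i2 < min (i2 + (e - i)) st.toList.dropLast.length := by omega
      have hmem2 : (((min (i2 + (e - i)) st.toList.dropLast.length : Nat) : Int) - (i2 : Int))
          ∈ hitLens st.toList.dropLast ((dCount st.toList : Int)) := by
        apply mem_hitLens.mpr
        refine ⟨i2, _, hi2e2, min_le_right _ _, ?_, rfl⟩
        rw [← hwinEq]
        exact_mod_cast hcov2
      calc List.foldl min ((st.toList.length : Int))
              (hitLens st.toList.dropLast ((dCount st.toList : Int)))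
          ≤ ((min (i2 + (e - i)) st.toList.dropLast.length : Nat) : Int) - (i2 : Int) :=
            foldl_min_le_mem hmem2 _
        _ ≤ (e : Int) - (i : Int) := by
            have := min_le_left (i2 + (e - i)) st.toList.dropLast.length
            omega
        _ = List.foldl min ((st.toList.length : Int))
              (hitLens st.toList ((dCount st.toList : Int))) := by rw [← hx]
    · have : List.foldl min ((st.toList.length : Int)) (hitLens st.toList ((dCount st.toList : Int)))
          = (e : Int) - (i : Int) := by rw [← hx]
      rw [this]
      have : ((st.toList.length : Nat) : Int) ≤ (e : Int) - (i : Int) := by omega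
      exact le_trans (foldl_min_le_init _ _) this

-- inside D_, B's capped minimum is strictly below A's
theorem mwin_lt (st : String) (hD : D_smallsub st) :
    mwin st.toList ((dCount st.toList : Int)) ((st.toList.length : Int))
      < mwin st.toList.dropLast ((dCount st.toList : Int)) ((st.toList.length : Int)) := by
  unfold mwin
  obtain ⟨l, hl, ⟨i0, hi0, hcov0⟩, hall⟩ := hD
  have hne : st.toList ≠ [] := by
    intro hc
    rw [hc] at hl
    simp at hl
  have hl1 : 1 ≤ l := by
    by_contra h0
    have hl0 : l = 0 := by omega
    rw [hl0, List.take_zero, dCount_nil] at hcov0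
    have := dCount_pos hne
    omega
  have hmem0 : (((min (i0 + l) st.toList.length : Nat) : Int) - (i0 : Int))
      ∈ hitLens st.toList ((dCount st.toList : Int)) := by
    apply mem_hitLens.mpr
    refine ⟨i0, _, lt_min_iff.mpr ⟨by omega, hi0⟩, min_le_right _ _, ?_, rfl⟩
    rw [← take_min_eq]
    exact_mod_cast hcov0
  have hB : List.foldl min ((st.toList.length : Int)) (hitLens st.toList ((dCount st.toList : Int)))
      ≤ (l : Int) := by
    refine le_trans (foldl_min_le_mem hmem0 _) ?_
    have := min_le_left (i0 + l) st.toList.length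
    omega
  rcases foldl_min_cases (hitLens st.toList.dropLast ((dCount st.toList : Int)))
      ((st.toList.length : Int)) with h | h
  · rw [h]
    omega
  · rcases mem_hitLens.mp h with ⟨i', e', h1', h2', hcov', hx'⟩
    have hcovN' : dCount ((st.toList.dropLast.drop i').take (e' - i')) = dCount st.toList := by
      exact_mod_cast hcov'
    have hbl : st.toList.dropLast.length = st.toList.length - 1 := List.length_dropLast
    have hstrict : l < e' - i' := by
      by_contra hle
      have hsub : (st.toList.dropLast.drop i').take (e' - i')
          ⊆ (st.toList.dropLast.drop i').take l := take_subset_take_le _ (by omega)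
      have hsubcs : (st.toList.dropLast.drop i').take l ⊆ st.toList := by
        intro x hx
        have hxb : x ∈ st.toList.dropLast := window_subset _ i' l hx
        exact List.dropLast_subset _ hxb
      have hcontra : dCount ((st.toList.dropLast.drop i').take l) = dCount st.toList :=
        dCount_mono_eq hsub hsubcs hcovN'
      exact hall i' (by omega) hcontra
    rw [hx']
    omega
-- ===== VERDICT (by name: the statements are the Claim_ definitions above) =====
theorem smallsub_spec : Claim_unchanged_smallsub := by
  unfold Claim_unchanged_smallsub Spec_smallsub
  intro st hdom hnD
  rw [A_char st hdom, B_char st]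
  exact le_antisymm (mwin_body_le_cs st hnD) (mwin_cs_le_body st.toList)

set_option maxRecDepth 8000 in
theorem smallsub_changed : Claim_changed_smallsub := by
  unfold Claim_changed_smallsub; decide

theorem smallsub_tight : Claim_exact_smallsub := by
  unfold Claim_exact_smallsub
  intro st hdom hD
  rw [A_char st hdom, B_char st]
  exact (ne_of_lt (mwin_lt st hD)).symm
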